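-- pv_equiv track=rewrite | github.com/Xtra-Computing/FedSim | src/utils/utils.py | get_split_points
-- ===== SOURCE A (Python) =====
-- def get_split_points(array, size):
--     assert size > 1
--
--     prev = array[0]
--     split_points = [0]
--     for i in range(1, size):
--         if prev != array[i]:
--             prev = array[i]
--             split_points.append(i)
--
--     split_points.append(size)
--     return split_points
-- ===== SOURCE B (Python) =====
-- from itertools import accumulate, groupby
--
-- def get_split_points(array, size):
--     assert size > 1
--     run_lengths = (sum(1 for _ in g) for _, g in groupby(array[i] for i in range(size)))
--     return [0] + list(accumulate(run_lengths))
-- ===== Notes on version B (the rewrite author's own statement) =====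
-- stated objective: idiomatic
-- what changed: B replaces the prev-vs-array[i] comparison loop with the itertools idiom: group the first `size` elements (read by index, so out-of-range size still raises) into runs with groupby, and return [0] plus the prefix sums (accumulate) of the run lengths.
import Mathlib
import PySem

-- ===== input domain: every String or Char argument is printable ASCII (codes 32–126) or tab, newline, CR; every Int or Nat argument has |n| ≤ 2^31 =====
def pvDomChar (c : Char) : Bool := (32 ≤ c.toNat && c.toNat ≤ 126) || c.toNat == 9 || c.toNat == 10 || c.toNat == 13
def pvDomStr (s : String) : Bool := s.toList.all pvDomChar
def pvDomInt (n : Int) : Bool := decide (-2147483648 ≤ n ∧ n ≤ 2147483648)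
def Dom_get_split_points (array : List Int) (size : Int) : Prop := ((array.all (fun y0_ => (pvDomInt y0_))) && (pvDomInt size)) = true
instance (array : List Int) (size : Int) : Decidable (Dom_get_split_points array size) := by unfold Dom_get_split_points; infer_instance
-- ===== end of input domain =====

-- B builds the boundary list as prefix sums of groupby run lengths over the indexed first
-- `size` elements, instead of comparing a running `prev` to each element; objective: idiomatic.

-- ===== PORT A =====
-- loop state is (prev, split_points); array[i] via pyGet? (in range under Pre_, so the default is never used there)
def get_split_points (array : List Int) (size : Int) : List Int :=
  let prev := (PySem.List.pyGet? array 0).getD 0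
  let st := (PySem.List.pyRange 1 size 1).foldl
    (fun (s : Int × List Int) i =>
      let a := (PySem.List.pyGet? array i).getD s.1
      if s.1 ≠ a then (a, s.2 ++ [i]) else s)
    (prev, [0])
  st.2 ++ [size]

-- ===== PORT B =====
-- lengths of the maximal runs of equal adjacent values (itertools.groupby run lengths)
def pvRunLengths : List Int → List Int
  | [] => []
  | x :: xs =>
    (1 + (xs.takeWhile (· == x)).length : Int) :: pvRunLengths (xs.dropWhile (· == x))
  termination_by l => l.length
  decreasing_by
    simpa using Nat.lt_succ_of_le (List.length_dropWhile_le (· == x) xs)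

-- itertools.accumulate, with running sum a
def pvAccum (a : Int) : List Int → List Int
  | [] => []
  | l :: ls => (a + l) :: pvAccum (a + l) ls

-- the generator (array[i] for i in range(size)); index lookup in range under Pre_
def get_split_points_alt (array : List Int) (size : Int) : List Int :=
  let vals := (PySem.List.pyRange 0 size 1).map (fun i => PySem.List.pyGetD array i 0)
  0 :: pvAccum 0 (pvRunLengths vals)

-- ===== PRECONDITION & SPEC =====
-- Pre_: exactly where A returns — the assert needs size > 1, and reading array[i] for i < size needs size ≤ len(array).
def Pre_get_split_points (array : List Int) (size : Int) : Prop :=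
  1 < size ∧ size ≤ array.length
instance (array : List Int) (size : Int) : Decidable (Pre_get_split_points array size) := by
  unfold Pre_get_split_points; infer_instance

def pvWitness_get_split_points : List Int × Int := ([3, 3, 5], 3)

def Spec_get_split_points (array : List Int) (size : Int) (out : List Int) : Prop :=
  out = get_split_points_alt array size
instance (array : List Int) (size : Int) (out : List Int) : Decidable (Spec_get_split_points array size out) := by
  unfold Spec_get_split_points; infer_instance

-- ===== CLAIM (what is proved, stated in full; the proofs are below) =====
def Claim_equal_get_split_points : Prop := ∀ (array : List Int) (size : Int), Dom_get_split_points array size → Pre_get_split_points array size → Spec_get_split_points array size (get_split_points array size)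

-- ===== LEMMAS AND PROOFS =====

-- the indexed generator equals the prefix of length n when n ≤ len(array)
theorem pvVals_eq_take (array : List Int) (n : Nat) (hn : n ≤ array.length) :
    (PySem.List.pyRange 0 (n : Int) 1).map (fun i => PySem.List.pyGetD array i 0)
      = array.take n := by
  have h1 : (PySem.List.pyRange 0 (n : Int) 1).map (fun i => PySem.List.pyGetD array i 0)
      = (PySem.List.pyRange 0 (n : Int) 1).map (fun i => PySem.List.pyGetD (array.take n) i 0) := by
    apply List.map_congr_left
    intro i hi
    rw [PySem.List.mem_pyRange_one] at hi
    obtain ⟨k, rfl⟩ : ∃ k : Nat, i = (k : Int) := ⟨i.toNat, by omega⟩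
    have hk : k < n := by exact_mod_cast hi.2
    rw [PySem.List.pyGetD_natCast, PySem.List.pyGetD_natCast]
    rw [List.getD_eq_getElem array 0 (by omega), List.getD_eq_getElem (array.take n) 0 (by simp; omega)]
    simp [List.getElem_take]
  rw [h1]
  have h2 := PySem.List.map_pyGetD_pyRange_zero (array.take n) (0 : Int)
  have hlen : PySem.List.len (array.take n) = (n : Int) := by
    simp [PySem.List.len]; omega
  rw [hlen] at h2
  exact h2

-- reference value: the indices a+1, a+2, … at which adjacent values of the list differ
def pvChg (a : Int) : List Int → List Int
  | [] => []
  | [_] => []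
  | x :: y :: ys => (if x ≠ y then [a + 1] else []) ++ pvChg (a + 1) (y :: ys)

theorem pvAccum_shift (a : Int) (c : Int) (ls : List Int) :
    pvAccum a ((1 + c) :: ls) = pvAccum (a + 1) (c :: ls) := by
  simp [pvAccum, ← add_assoc]

-- B-side characterisation: cumulative run lengths = change indices plus the final boundary
theorem pvAccum_runLengths (xs : List Int) : ∀ (x a : Int),
    pvAccum a (pvRunLengths (x :: xs)) = pvChg a (x :: xs) ++ [a + 1 + xs.length] := by
  induction xs with
  | nil => intro x a; simp [pvRunLengths, pvAccum, pvChg]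
  | cons y ys ih =>
    intro x a
    by_cases h : y = x
    · subst h
      have h1 : pvRunLengths (y :: y :: ys) =
          (1 + (1 + (ys.takeWhile (· == y)).length : Int)) :: pvRunLengths (ys.dropWhile (· == y)) := by
        rw [pvRunLengths.eq_def]
        simp [List.takeWhile, List.dropWhile]
        ring
      have h2 : pvRunLengths (y :: ys) =
          (1 + ((ys.takeWhile (· == y)).length : Int)) :: pvRunLengths (ys.dropWhile (· == y)) := by
        rw [pvRunLengths.eq_def]
      rw [h1, pvAccum_shift, ← h2, ih y (a + 1)]
      simp [pvChg]
      omega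
    · have hb : (y == x) = false := by simp [h]
      have h1 : pvRunLengths (x :: y :: ys) = (1 : Int) :: pvRunLengths (y :: ys) := by
        rw [pvRunLengths.eq_def]
        simp [List.takeWhile, List.dropWhile, hb]
      rw [h1, pvAccum, ih y (a + 1)]
      simp [pvChg, Ne.symm h]
      omega

-- A-side loop characterisation: fold over range(j, n) starting from prev = array[j-1]
theorem pvA_loop (array : List Int) (n : Nat) (hn : n ≤ array.length) :
    ∀ (k : Nat) (j : Nat) (acc : List Int), j + k = n → 1 ≤ j →
    ((PySem.List.pyRange (j : Int) (n : Int) 1).foldl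
      (fun (s : Int × List Int) i =>
        let a := (PySem.List.pyGet? array i).getD s.1
        if s.1 ≠ a then (a, s.2 ++ [i]) else s)
      (array.getD (j - 1) 0, acc)).2
      = acc ++ pvChg ((j : Int) - 1) ((array.take n).drop (j - 1)) := by
  intro k
  induction k with
  | zero =>
    intro j acc hjk hj
    rw [PySem.List.pyRange_one_eq_nil (by omega)]
    have hd : ((array.take n).drop (j - 1)).length ≤ 1 := by
      rw [List.length_drop, List.length_take]; omega
    rcases hl : (array.take n).drop (j - 1) with _ | ⟨z, _ | ⟨w, ws⟩⟩
    · simp [pvChg]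
    · simp [pvChg]
    · exfalso; rw [hl] at hd; simp at hd
  | succ m ih =>
    intro j acc hjk hj
    have hjn : (j : Int) < (n : Int) := by
      have : j < n := by omega
      exact_mod_cast this
    rw [PySem.List.pyRange_one_cons hjn]
    have hjlen : j < array.length := by omega
    have hget : (PySem.List.pyGet? array (j : Int)) = some array[j] := by
      simp [PySem.List.pyGet?, PySem.List.pyIdx?, hjlen]
    have hj1 : j - 1 < array.length := by omega
    have hgetD : array.getD (j - 1) 0 = array[j - 1] := List.getD_eq_getElem array 0 hj1
    have hdrop : (array.take n).drop (j - 1) = array[j - 1] :: array[j] :: (array.take n).drop (j + 1) := by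
      have e1 := (List.getElem_cons_drop (as := array.take n) (i := j - 1) (by rw [List.length_take]; omega)).symm
      have e2 := (List.getElem_cons_drop (as := array.take n) (i := j) (by rw [List.length_take]; omega)).symm
      rw [e1, show j - 1 + 1 = j by omega, e2]
      simp [List.getElem_take]
    by_cases hne : array[j - 1] = array[j]
    · have step : (let a := (PySem.List.pyGet? array (j : Int)).getD (array.getD (j - 1) 0, acc).1;
          if (array.getD (j - 1) 0, acc).1 ≠ a then (a, (array.getD (j - 1) 0, acc).2 ++ [(j : Int)])
          else (array.getD (j - 1) 0, acc)) = (array.getD j 0, acc) := by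
        simp only [hget, hgetD, Option.getD_some]
        rw [if_neg (by simp [hne])]
        simp [List.getElem?_eq_getElem hjlen, hne]
      rw [List.foldl_cons]
      rw [step]
      have hrec := ih (j + 1) acc (by omega) (by omega)
      rw [Nat.add_sub_cancel, Nat.cast_add, Nat.cast_one] at hrec
      rw [hrec, hdrop]
      rw [pvChg]
      simp only [hne, ne_eq, not_true_eq_false, if_false, List.nil_append]
      have hd2 : (array.take n).drop j = array[j] :: (array.take n).drop (j + 1) := by
        have := (List.getElem_cons_drop (as := array.take n) (i := j) (by rw [List.length_take]; omega)).symm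
        rw [this]; simp [List.getElem_take]
      rw [hd2, show ((j:Int) + 1 - 1) = (j:Int) by ring, show ((j:Int) - 1 + 1) = (j:Int) by ring]
    · have step : (let a := (PySem.List.pyGet? array (j : Int)).getD (array.getD (j - 1) 0, acc).1;
          if (array.getD (j - 1) 0, acc).1 ≠ a then (a, (array.getD (j - 1) 0, acc).2 ++ [(j : Int)])
          else (array.getD (j - 1) 0, acc)) = (array.getD j 0, acc ++ [(j : Int)]) := by
        simp only [hget, hgetD, Option.getD_some]
        rw [if_pos (by simp [hne])]
        simp [List.getElem?_eq_getElem hjlen]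
      rw [List.foldl_cons]
      rw [step]
      have hrec := ih (j + 1) (acc ++ [(j : Int)]) (by omega) (by omega)
      rw [Nat.add_sub_cancel, Nat.cast_add, Nat.cast_one] at hrec
      rw [hrec, hdrop]
      rw [pvChg]
      simp only [hne, ne_eq, not_false_eq_true, if_true, List.append_assoc, List.singleton_append]
      have hd2 : (array.take n).drop j = array[j] :: (array.take n).drop (j + 1) := by
        have := (List.getElem_cons_drop (as := array.take n) (i := j) (by rw [List.length_take]; omega)).symm
        rw [this]; simp [List.getElem_take]
      rw [hd2, show ((j:Int) + 1 - 1) = (j:Int) by ring, show ((j:Int) - 1 + 1) = (j:Int) by ring]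

-- ===== VERDICT (by name: the statement is the Claim_ definition above) =====
theorem get_split_points_spec : Claim_equal_get_split_points := by
  intro array size _ hpre
  obtain ⟨h1, h2⟩ := hpre
  obtain ⟨n, rfl⟩ : ∃ n : Nat, size = (n : Int) := ⟨size.toNat, by omega⟩
  have hn2 : 2 ≤ n := by omega
  have hnlen : n ≤ array.length := by omega
  unfold Spec_get_split_points get_split_points get_split_points_alt
  rw [pvVals_eq_take array n hnlen]
  have hget0 : (PySem.List.pyGet? array 0).getD 0 = array.getD 0 0 := by
    have h0 : 0 < array.length := by omega
    have : (PySem.List.pyGet? array 0) = some array[0] := by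
      simp [PySem.List.pyGet?, PySem.List.pyIdx?, h0]
    rw [this, List.getD_eq_getElem array 0 h0]
    rfl
  have harg1 : 1 + (n - 1) = n := by omega
  have hloop := pvA_loop array n hnlen (n - 1) 1 [0] harg1 (Nat.le_refl 1)
  simp only [Nat.cast_one] at hloop
  rw [show ((1:Nat) - 1) = 0 from rfl] at hloop
  simp only [hget0]
  rw [hloop]
  have hnn : array.take n ≠ [] := by
    apply List.ne_nil_of_length_pos
    rw [List.length_take]; omega
  obtain ⟨x, xs, hx⟩ := List.exists_cons_of_ne_nil hnn
  have hlen : xs.length = n - 1 := by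
    have hll := congrArg List.length hx
    rw [List.length_take] at hll
    simp at hll
    omega
  rw [hx]
  simp only [List.drop_zero]
  rw [pvAccum_runLengths xs x 0]
  have he : (0 : Int) + 1 + (xs.length : Int) = (n : Int) := by
    rw [hlen]; push_cast; omega
  rw [he]
  simp
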